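-- pv_equiv track=rewrite | github.com/agomezvasq/psl_internship_challenge_sspe | sspe.py | parse
-- ===== SOURCE A (Python) =====
-- def to_digit(binary):
--     if binary == '000001001':
--         return 1
--     elif binary == '010011110':
--         return 2
--     elif binary == '010011011':
--         return 3
--     elif binary == '000111001':
--         return 4
--     elif binary == '010110011':
--         return 5
--     elif binary == '010110111':
--         return 6
--     elif binary == '010001001':
--         return 7
--     elif binary == '010111111':
--         return 8
--     elif binary == '010111001':
--         return 9
--     elif binary == '010101111':
--         return 0
--     return -1
--
-- def to_binary(string):
--     return ''.join(['0' if char == ' ' else '1' for char in string])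
--
-- def splice(string):
--     return [to_binary(string[x:x+3]) for x in range(0, len(string), 4)]
--
-- def parse(string):
--     # Split into 3 lines
--     lines = string.splitlines()
--
--     # Separate each one of them by binary strings of length 3
--     first_line_segments = splice(lines[0])
--     second_line_segments = splice(lines[1])
--     third_line_segments = splice(lines[2])
--
--     digit_count = len(first_line_segments)
--
--     # Merge all three sets to get full binary string
--     full_segments = [first_line_segments[x] + second_line_segments[x] + third_line_segments[x]
--                      for x in range(digit_count)]
--
--     return ''.join([str(to_digit(x)) for x in full_segments])
-- ===== SOURCE B (Python) =====
-- PATTERNS = {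
--     '000001001': '1',
--     '010011110': '2',
--     '010011011': '3',
--     '000111001': '4',
--     '010110011': '5',
--     '010110111': '6',
--     '010001001': '7',
--     '010111111': '8',
--     '010111001': '9',
--     '010101111': '0',
-- }
--
--
-- def parse(string):
--     lines = string.splitlines()
--     r0, r1, r2 = lines[0], lines[1], lines[2]
--     out = ''
--     while r0:
--         key = ''.join('1' if c != ' ' else '0' for c in r0[:3] + r1[:3] + r2[:3])
--         out += PATTERNS.get(key, '-1')
--         r0, r1, r2 = r0[4:], r1[4:], r2[4:]
--     return out
-- ===== Notes on version B (the rewrite author's own statement) =====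
-- stated objective: simpler
-- what changed: Replaced A's three staged splice passes (building per-line lists of 3-bit segments) plus the range-indexed merge by a single accumulator loop that consumes the three rows in parallel, four columns at a time, looking each cell up in a module-level pattern dict with the same fallthrough default and appending to the output string.
import Mathlib
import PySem

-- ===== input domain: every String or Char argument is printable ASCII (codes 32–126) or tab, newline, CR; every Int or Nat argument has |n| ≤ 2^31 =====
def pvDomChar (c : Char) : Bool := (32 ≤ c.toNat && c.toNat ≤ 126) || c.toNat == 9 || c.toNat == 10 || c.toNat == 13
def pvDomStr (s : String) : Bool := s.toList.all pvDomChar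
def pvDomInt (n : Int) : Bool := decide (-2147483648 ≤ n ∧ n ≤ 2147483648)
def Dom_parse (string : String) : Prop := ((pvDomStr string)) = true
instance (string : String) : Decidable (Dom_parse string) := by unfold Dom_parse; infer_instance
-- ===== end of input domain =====

-- B replaces A's staged splice lists and index-zip merge by one accumulator loop that consumes the
-- three rows four columns at a time, looking each cell up in a pattern dict (objective: simpler).

-- ===== PORT A =====
def to_digit (binary : List Char) : Int :=
  if binary = "000001001".toList then 1
  else if binary = "010011110".toList then 2
  else if binary = "010011011".toList then 3
  else if binary = "000111001".toList then 4
  else if binary = "010110011".toList then 5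
  else if binary = "010110111".toList then 6
  else if binary = "010001001".toList then 7
  else if binary = "010111111".toList then 8
  else if binary = "010111001".toList then 9
  else if binary = "010101111".toList then 0
  else -1

def to_binary (s : List Char) : List Char :=
  s.map (fun c => if c == ' ' then '0' else '1')

def splice (s : List Char) : List (List Char) :=
  (PySem.List.pyRange 0 (PySem.List.len s) 4).map
    (fun x => to_binary (PySem.List.slice s (some x) (some (x + 3))))

def parse (string : String) : String :=
  let lines := PySem.Chars.splitlines string.toList
  let firstLineSegments := splice (PySem.List.pyGetD lines 0 [])
  let secondLineSegments := splice (PySem.List.pyGetD lines 1 [])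
  let thirdLineSegments := splice (PySem.List.pyGetD lines 2 [])
  let digitCount := PySem.List.len firstLineSegments
  let fullSegments := (PySem.List.pyRange 0 digitCount 1).map
    (fun x => PySem.List.pyGetD firstLineSegments x []
      ++ PySem.List.pyGetD secondLineSegments x []
      ++ PySem.List.pyGetD thirdLineSegments x [])
  String.ofList (PySem.Chars.join [] (fullSegments.map (fun x => PySem.Int.toChars (to_digit x))))

-- ===== PORT B =====
def patterns : PySem.Dict (List Char) (List Char) :=
  PySem.Dict.ofList
    [("000001001".toList, "1".toList), ("010011110".toList, "2".toList),
     ("010011011".toList, "3".toList), ("000111001".toList, "4".toList),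
     ("010110011".toList, "5".toList), ("010110111".toList, "6".toList),
     ("010001001".toList, "7".toList), ("010111111".toList, "8".toList),
     ("010111001".toList, "9".toList), ("010101111".toList, "0".toList)]

-- the per-cell bit string: ''.join('0' if c == ' ' else '1' for c in …)
def bits (s : List Char) : List Char :=
  s.map (fun c => if c != ' ' then '1' else '0')

-- the while loop: r0[:3]/r0[4:] with nonnegative literal bounds are exactly List.take 3 / List.drop 4
-- (PySem.List.slice_to / slice_from); 'out' is the accumulated result string
def scan : List Char → List Char → List Char → List Char → List Char
  | [], _, _, out => out
  | c :: t, r1, r2, out =>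
      scan ((c :: t).drop 4) (r1.drop 4) (r2.drop 4)
        (out ++ PySem.Dict.getD patterns
          (bits ((c :: t).take 3 ++ r1.take 3 ++ r2.take 3)) ['-', '1'])
termination_by r0 _ _ _ => r0.length
decreasing_by simp [List.length_drop]

def parse_alt (string : String) : String :=
  let lines := PySem.Chars.splitlines string.toList
  String.ofList (scan (PySem.List.pyGetD lines 0 [])
                      (PySem.List.pyGetD lines 1 [])
                      (PySem.List.pyGetD lines 2 []) [])

-- ===== PRECONDITION & SPEC =====
-- number of length-3 chunks splice produces from a line: ceil(len/4)
def nsegs (s : List Char) : Nat := (s.length + 3) / 4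

-- Pre_ excludes exactly the inputs where A raises IndexError: fewer than 3 lines, or a second or
-- third line yielding fewer chunks than the first.
def Pre_parse (string : String) : Prop :=
  3 ≤ (PySem.Chars.splitlines string.toList).length ∧
  nsegs ((PySem.Chars.splitlines string.toList).getD 0 []) ≤
    nsegs ((PySem.Chars.splitlines string.toList).getD 1 []) ∧
  nsegs ((PySem.Chars.splitlines string.toList).getD 0 []) ≤
    nsegs ((PySem.Chars.splitlines string.toList).getD 2 [])
instance (string : String) : Decidable (Pre_parse string) := by unfold Pre_parse; infer_instance

def pvWitness_parse : String := " _     _ \n _| | |_ \n|_  | |_|"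

def Spec_parse (string : String) (out : String) : Prop := out = parse_alt string
instance (string : String) (out : String) : Decidable (Spec_parse string out) := by unfold Spec_parse; infer_instance

-- ===== CLAIM (what is proved, stated in full; the proofs are below) =====
def Claim_equal_parse : Prop := ∀ (string : String), Dom_parse string → Pre_parse string → Spec_parse string (parse string)

-- ===== LEMMAS AND PROOFS =====

-- range(0, n, 4) over a natural bound, as a mapped List.range
lemma range4_eq (n : Nat) :
    PySem.List.pyRange 0 (n : Int) 4 =
      (List.range ((n + 3) / 4)).map (fun k => ((4 * k : Nat) : Int)) := by
  rw [PySem.List.pyRange_of_pos 0 (n : Int) (by norm_num)]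
  have h : (if (0:Int) < (n:Int) then (((n:Int) - 0 + 4 - 1) / 4).toNat else 0) = (n + 3) / 4 := by
    split_ifs with h <;> omega
  rw [h]
  apply List.map_congr_left
  intro k _
  push_cast
  ring

-- a slice s[4k:4k+3] is drop/take
lemma slice_chunk (s : List Char) (k : Nat) :
    PySem.List.slice s (some ((4 * k : Nat) : Int)) (some (((4 * k : Nat) : Int) + 3)) =
      (s.drop (4 * k)).take 3 := by
  have h : ((4 * k : Nat) : Int) + 3 = ((4 * k + 3 : Nat) : Int) := by push_cast; ring
  rw [h, PySem.List.slice_natCast]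
  congr 1
  omega

-- splice as a map over chunk indices
lemma splice_eq (s : List Char) :
    splice s = (List.range (nsegs s)).map (fun k => to_binary ((s.drop (4 * k)).take 3)) := by
  unfold splice nsegs
  rw [PySem.List.len_eq, range4_eq, List.map_map]
  apply List.map_congr_left
  intro k _
  simp only [Function.comp, slice_chunk]

-- B's inline bit encoding is A's to_binary, and distributes over ++
lemma bits_eq (s : List Char) : bits s = to_binary s := by
  unfold bits to_binary
  apply List.map_congr_left
  intro c _
  by_cases h : c = ' ' <;> simp [h]

lemma bits_append (s u : List Char) : bits (s ++ u) = bits s ++ bits u := by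
  unfold bits; exact List.map_append ..

-- the dictionary lookup agrees with str(to_digit(...)) on every key
lemma lookup_eq (key : List Char) :
    PySem.Dict.getD patterns key ['-', '1'] = PySem.Int.toChars (to_digit key) := by
  unfold to_digit
  split_ifs with h1 h2 h3 h4 h5 h6 h7 h8 h9 h10 <;> subst_vars <;> first | rfl | skip
  have hk : patterns.keys = ["000001001".toList, "010011110".toList, "010011011".toList,
      "000111001".toList, "010110011".toList, "010110111".toList, "010001001".toList,
      "010111111".toList, "010111001".toList, "010101111".toList] := by decide
  have hc : patterns.contains key = false := by
    rw [PySem.Dict.contains_eq_decide_mem_keys, hk]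
    simp at h1 h2 h3 h4 h5 h6 h7 h8 h9 h10
    simp [h1, h2, h3, h4, h5, h6, h7, h8, h9, h10]
  rw [PySem.Dict.getD_of_not_contains _ _ hc]
  decide

-- ''.join (empty separator) is flatten
lemma join_empty_sep (xs : List (List Char)) : PySem.Chars.join [] xs = xs.flatten := by
  induction xs with
  | nil => rw [PySem.Chars.join_nil]; rfl
  | cons p rest ih =>
    cases rest with
    | nil => rw [PySem.Chars.join_singleton]; simp
    | cons q r =>
      rw [PySem.Chars.join_cons_cons, List.flatten_cons, ← ih]
      simp

-- the loop, characterised: the accumulator followed by a flattened map over chunk indices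
lemma scan_eq (n : Nat) : ∀ (r0 r1 r2 out : List Char), nsegs r0 = n →
    scan r0 r1 r2 out =
      out ++ ((List.range n).map (fun k =>
        PySem.Dict.getD patterns
          (bits ((r0.drop (4 * k)).take 3) ++ bits ((r1.drop (4 * k)).take 3)
            ++ bits ((r2.drop (4 * k)).take 3)) ['-', '1'])).flatten := by
  induction n with
  | zero =>
    intro r0 r1 r2 out hn
    have : r0 = [] := by
      cases r0 with
      | nil => rfl
      | cons c t => exfalso; unfold nsegs at hn; simp at hn; omega
    subst this
    rw [scan]
    simp
  | succ n ih =>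
    intro r0 r1 r2 out hn
    cases r0 with
    | nil => exfalso; unfold nsegs at hn; simp at hn
    | cons c t =>
      rw [scan]
      have hlen : nsegs ((c :: t).drop 4) = n := by
        unfold nsegs at hn ⊢
        simp at hn ⊢
        omega
      rw [ih _ (List.drop 4 r1) (List.drop 4 r2) _ hlen, List.range_succ_eq_map, List.map_cons, List.flatten_cons,
          List.map_map, List.append_assoc]
      congr 2
      · rw [bits_append, bits_append]
        simp
      · congr 1
        apply List.map_congr_left
        intro k _
        have e : ∀ (s : List Char), (s.drop 4).drop (4 * k) = s.drop (4 * (k + 1)) := by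
          intro s; rw [List.drop_drop]; congr 1; omega
        rw [e, e, e]
        rfl

-- ===== VERDICT (by name: the statement is the Claim_ definition above) =====
theorem parse_spec : Claim_equal_parse := by
  intro s _ hpre
  unfold Spec_parse parse parse_alt
  obtain ⟨hlen, h01, h02⟩ := hpre
  set L := PySem.Chars.splitlines s.toList with hL
  have e0 : PySem.List.pyGetD L (0:Int) [] = L.getD 0 [] := by
    rw [show (0:Int) = ((0:Nat):Int) from rfl, PySem.List.pyGetD_natCast]
  have e1 : PySem.List.pyGetD L (1:Int) [] = L.getD 1 [] := by
    rw [show (1:Int) = ((1:Nat):Int) from rfl, PySem.List.pyGetD_natCast]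
  have e2 : PySem.List.pyGetD L (2:Int) [] = L.getD 2 [] := by
    rw [show (2:Int) = ((2:Nat):Int) from rfl, PySem.List.pyGetD_natCast]
  simp only [e0, e1, e2]
  set l0 := L.getD 0 [] with hl0
  set l1 := L.getD 1 [] with hl1
  set l2 := L.getD 2 [] with hl2
  rw [splice_eq l0, splice_eq l1, splice_eq l2, scan_eq (nsegs l0) l0 l1 l2 [] rfl, List.nil_append]
  congr 1
  -- A side: index loop over range(digit_count), ''.join with empty separator = flatten
  rw [PySem.List.len_eq, List.length_map, List.length_range,
      PySem.List.pyRange_zero_nat, List.map_map, List.map_map,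
      join_empty_sep]
  congr 1
  apply List.map_congr_left
  intro k hk
  rw [List.mem_range] at hk
  simp only [Function.comp, PySem.List.pyGetD_natCast]
  rw [PySem.List.getD_map_range _ _ _ _ hk,
      PySem.List.getD_map_range _ _ _ _ (lt_of_lt_of_le hk h01),
      PySem.List.getD_map_range _ _ _ _ (lt_of_lt_of_le hk h02),
      lookup_eq, bits_eq, bits_eq, bits_eq]
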